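-- pv_equiv track=rewrite | github.com/LapProg-UAC/Lab_Prog_Alexandre_costa | Laboratório de Programação/Semana 6/Semana6Final.py | folding_hash
-- ===== SOURCE A (Python) =====
-- def folding_hash(phrase, block_size=4):
--     """
--     Calcula o hash base de uma string utilizando o metodo de folding.
--     Divide o texto em colunas e soma os valores ASCII.
--     """
--     ascii_chars = []
--
--     for c in phrase:
--         ascii_chars.append(ord(c))
--
--     while len(ascii_chars) % block_size != 0:
--         ascii_chars.append(ord(str(block_size)))
--
--     column_sums = [0] * block_size
--
--     for i, value in enumerate(ascii_chars):
--         target_column = i % block_size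
--         column_sums[target_column] += value
--
--     hex_list = []
--     for s in column_sums:
--         remainder = s % 256
--         hex_list.append(remainder)
--
--     return hex_list
-- ===== SOURCE B (Python) =====
-- def folding_hash(phrase, block_size=4):
--     """Folding hash: chunk the text into blocks and add them column-wise, mod 256."""
--     n = len(phrase)
--     num_blocks = (n + block_size - 1) // block_size
--     cols = [0] * block_size
--     for q in range(num_blocks):
--         for j, ch in enumerate(phrase[q * block_size:(q + 1) * block_size]):
--             cols[j] += ord(ch)
--     fill = n % block_size
--     if fill:
--         pad_value = ord(str(block_size))
--         for j in range(fill, block_size):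
--             cols[j] += pad_value
--     return [s % 256 for s in cols]
-- ===== Notes on version B (the rewrite author's own statement) =====
-- stated objective: alternative
-- what changed: B never materialises the per-character ASCII list or the padding while-loop: it walks the string block by block via slices, adding each block column-wise into the accumulator, and applies the padding contribution arithmetically (one addition per padded column computed from n % block_size), instead of A's flat enumerate loop with modular target indexing over an explicitly padded list.
import Mathlib
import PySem

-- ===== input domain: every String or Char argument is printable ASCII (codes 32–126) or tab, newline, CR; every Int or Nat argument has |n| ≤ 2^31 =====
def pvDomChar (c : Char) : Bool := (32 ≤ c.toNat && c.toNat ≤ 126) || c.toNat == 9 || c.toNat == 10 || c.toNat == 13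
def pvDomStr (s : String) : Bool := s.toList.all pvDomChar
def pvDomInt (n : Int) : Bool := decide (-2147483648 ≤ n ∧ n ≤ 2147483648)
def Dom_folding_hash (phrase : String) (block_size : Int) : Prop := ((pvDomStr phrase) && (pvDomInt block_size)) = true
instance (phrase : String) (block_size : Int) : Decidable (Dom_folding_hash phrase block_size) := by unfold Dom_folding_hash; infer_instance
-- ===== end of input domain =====

-- B re-decomposes the folding hash: it walks the string block by block (slice per block, added
-- column-wise) and applies the padding contribution arithmetically from n % block_size, instead of
-- A's explicit ASCII list, padding while-loop and flat enumerate loop with modular target indexing.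

-- ===== PORT A =====
-- ord(str(m)): exact when str(m) is one character (the only case reached under Pre_, 1 ≤ m ≤ 9);
-- on longer strings Python's ord raises TypeError (those inputs are outside Pre_).
def pvOrdStr (m : Int) : Int :=
  match (PySem.Int.toStr m).toList with
  | [c] => (c.toNat : Int)
  | _ => 0

-- the 'while len(ascii_chars) % block_size != 0: ascii_chars.append(...)' loop; fuel bs.toNat
-- suffices under Pre_ (at most block_size - 1 pads are appended).
def padLoop (ascii : List Int) (bs padv : Int) : Nat → List Int
  | 0 => ascii
  | fuel + 1 =>
    if PySem.Int.mod (ascii.length : Int) bs ≠ 0 then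
      padLoop (ascii ++ [padv]) bs padv fuel
    else ascii

def folding_hash (phrase : String) (block_size : Int) : List Int :=
  let ascii0 : List Int := phrase.toList.map (fun c => (c.toNat : Int))
  let ascii_chars := padLoop ascii0 block_size (pvOrdStr block_size) block_size.toNat
  let column_sums : List Int := List.replicate block_size.toNat 0
  let column_sums := (PySem.List.enumerate ascii_chars 0).foldl
    (fun cols p =>
      let target := PySem.Int.mod p.1 block_size
      PySem.List.pySetD cols target (PySem.List.pyGetD cols target 0 + p.2)) column_sums
  column_sums.map (fun s => PySem.Int.mod s 256)

-- ===== PORT B =====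
def folding_hash_alt (phrase : String) (block_size : Int) : List Int :=
  let n : Int := (phrase.toList.length : Int)
  let num_blocks := PySem.Int.floordiv (n + block_size - 1) block_size
  let cols : List Int := List.replicate block_size.toNat 0
  let cols := (PySem.List.pyRange 0 num_blocks 1).foldl
    (fun cols q =>
      (PySem.List.enumerate (PySem.List.slice phrase.toList (some (q * block_size)) (some ((q + 1) * block_size))) 0).foldl
        (fun cols p => PySem.List.pySetD cols p.1 (PySem.List.pyGetD cols p.1 0 + (p.2.toNat : Int))) cols) cols
  let fill := PySem.Int.mod n block_size
  let cols := if fill ≠ 0 then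
      (PySem.List.pyRange fill block_size 1).foldl
        (fun cols j => PySem.List.pySetD cols j (PySem.List.pyGetD cols j 0 + pvOrdStr block_size)) cols
    else cols
  cols.map (fun s => PySem.Int.mod s 256)

-- ===== PRECONDITION & SPEC =====
-- Pre_ holds exactly where Python A returns: A raises ZeroDivisionError for block_size = 0,
-- TypeError (ord of a multi-char string) for block_size ≥ 10 when padding is needed, and
-- IndexError/TypeError for negative block_size on a non-empty phrase (on the empty phrase with a
-- negative block_size A returns []).
def Pre_folding_hash (phrase : String) (block_size : Int) : Prop :=
  (1 ≤ block_size ∧ (block_size ≤ 9 ∨ PySem.Int.mod (phrase.toList.length : Int) block_size = 0))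
  ∨ (block_size < 0 ∧ phrase.toList = [])
instance (phrase : String) (block_size : Int) : Decidable (Pre_folding_hash phrase block_size) := by
  unfold Pre_folding_hash; infer_instance

def pvWitness_folding_hash : String × Int := ("abc", 4)

def Spec_folding_hash (phrase : String) (block_size : Int) (out : List Int) : Prop := out = folding_hash_alt phrase block_size
instance (phrase : String) (block_size : Int) (out : List Int) : Decidable (Spec_folding_hash phrase block_size out) := by unfold Spec_folding_hash; infer_instance

-- ===== CLAIM (what is proved, stated in full; the proofs are below) =====
def Claim_equal_folding_hash : Prop := ∀ (phrase : String) (block_size : Int), Dom_folding_hash phrase block_size → Pre_folding_hash phrase block_size → Spec_folding_hash phrase block_size (folding_hash phrase block_size)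

-- ===== LEMMAS AND PROOFS =====

-- A's per-element update: add the value at column i % bs.
def pvStepA (bs : Int) (cols : List Int) (p : Int × Int) : List Int :=
  let target := PySem.Int.mod p.1 bs
  PySem.List.pySetD cols target (PySem.List.pyGetD cols target 0 + p.2)

-- B's per-element update: add the value at the enumerate index itself.
def pvStepB (cols : List Int) (p : Int × Int) : List Int :=
  PySem.List.pySetD cols p.1 (PySem.List.pyGetD cols p.1 0 + p.2)

-- B's inner loop over one block (on the block's ASCII values).
def pvInner (chunk : List Char) (cols : List Int) : List Int :=
  (PySem.List.enumerate (chunk.map (fun c => (c.toNat : Int))) 0).foldl pvStepB cols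

-- B's outer loop in block-recursive form.
def pvChunkRec (b : Nat) : Nat → List Char → List Int → List Int
  | 0, _, cols => cols
  | m + 1, ys, cols => pvChunkRec b m (ys.drop b) (pvInner (ys.take b) cols)

-- B's padding loop.
def pvPadFold (bs v r : Int) (cols : List Int) : List Int :=
  (PySem.List.pyRange r bs 1).foldl
    (fun cols j => PySem.List.pySetD cols j (PySem.List.pyGetD cols j 0 + v)) cols

-- number of pad values A appends
def pvNeeded (n b : Nat) : Nat := (b - n % b) % b

lemma pvPadLoop_spec (bs : Int) (hb : 0 < bs) (v : Int) :
    ∀ (fuel : Nat) (xs : List Int), pvNeeded xs.length bs.toNat ≤ fuel →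
      padLoop xs bs v fuel = xs ++ List.replicate (pvNeeded xs.length bs.toNat) v := by
  intro fuel
  induction fuel with
  | zero =>
    intro xs h
    have h0 : pvNeeded xs.length bs.toNat = 0 := Nat.le_zero.mp h
    simp [padLoop, h0]
  | succ fuel ih =>
    intro xs h
    have hbs : bs = ((bs.toNat : Nat) : Int) := (Int.toNat_of_nonneg hb.le).symm
    have hbpos : 0 < bs.toNat := by omega
    set b := bs.toNat with hbdef
    have hmod : PySem.Int.mod (xs.length : Int) bs = ((xs.length % b : Nat) : Int) := by
      rw [hbs]; exact PySem.Int.mod_natCast _ _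
    by_cases hz : xs.length % b = 0
    · have : pvNeeded xs.length b = 0 := by
        unfold pvNeeded; rw [hz]; simp
      simp [padLoop, hmod, hz, this]
    · have hr : xs.length % b < b := Nat.mod_lt _ hbpos
      have hne : PySem.Int.mod (xs.length : Int) bs ≠ 0 := by
        rw [hmod]; exact_mod_cast hz
      rw [padLoop, if_pos hne]
      have hlen : (xs ++ [v]).length = xs.length + 1 := by simp
      set r := xs.length % b with hrdef
      have hmod1 : (xs.length + 1) % b = (r + 1) % b := by
        have hdm := Nat.div_add_mod xs.length b
        conv_lhs => rw [show xs.length + 1 = (r + 1) + b * (xs.length / b) by omega]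
        exact Nat.add_mul_mod_self_left _ _ _
      have hneed : pvNeeded xs.length b = b - r := by
        unfold pvNeeded; rw [← hrdef]; exact Nat.mod_eq_of_lt (by omega)
      have hneed1 : pvNeeded (xs.length + 1) b = b - r - 1 := by
        unfold pvNeeded; rw [hmod1]
        by_cases hrb : r + 1 = b
        · rw [hrb, Nat.mod_self, Nat.sub_zero, Nat.mod_self]; omega
        · rw [Nat.mod_eq_of_lt (show r + 1 < b by omega), Nat.mod_eq_of_lt (show b - (r + 1) < b by omega)]; omega
      have := ih (xs ++ [v]) (by rw [hlen, hneed1]; omega)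
      rw [this, hlen, hneed1, hneed, List.append_assoc]
      congr 1
      rw [show b - r = (b - r - 1) + 1 by omega, List.replicate_succ]
      simp

lemma pvInner_eq (bs : Int) (hb : 0 < bs) :
    ∀ (chunk : List Int) (j0 i0 : Int) (cols : List Int),
      0 ≤ j0 → j0 + chunk.length ≤ bs → 0 ≤ i0 → PySem.Int.mod i0 bs = j0 →
      (PySem.List.enumerate chunk i0).foldl (pvStepA bs) cols
        = (PySem.List.enumerate chunk j0).foldl pvStepB cols := by
  intro chunk
  induction chunk with
  | nil => intro j0 i0 cols _ _ _ _; simp [PySem.List.enumerate_nil]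
  | cons v r ih =>
    intro j0 i0 cols hj0 hlen hi0 hmod
    rw [PySem.List.enumerate_cons, PySem.List.enumerate_cons, List.foldl_cons, List.foldl_cons]
    have hstep : pvStepA bs cols (i0, v) = pvStepB cols (j0, v) := by
      simp [pvStepA, pvStepB, hmod]
    rw [hstep]
    cases r with
    | nil => simp [PySem.List.enumerate_nil]
    | cons w t =>
      apply ih
      · omega
      · simp at hlen ⊢; omega
      · omega
      · have h1 : j0 + 1 < bs := by simp at hlen; omega
        have hbs2 : (1 : Int) < bs := by omega
        rw [PySem.Int.mod_eq_emod_of_pos hb] at hmod ⊢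
        rw [Int.add_emod, hmod, Int.emod_eq_of_lt (by omega) hbs2,
            Int.emod_eq_of_lt (by omega) (by omega)]

lemma pvInner_chars (chunk : List Char) :
    ∀ (j0 : Int) (cols : List Int),
      (PySem.List.enumerate chunk j0).foldl
          (fun cols p => PySem.List.pySetD cols p.1 (PySem.List.pyGetD cols p.1 0 + (p.2.toNat : Int))) cols
        = (PySem.List.enumerate (chunk.map (fun c => (c.toNat : Int))) j0).foldl pvStepB cols := by
  induction chunk with
  | nil => intro j0 cols; simp [PySem.List.enumerate_nil]
  | cons c r ih =>
    intro j0 cols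
    rw [List.map_cons, PySem.List.enumerate_cons, PySem.List.enumerate_cons,
        List.foldl_cons, List.foldl_cons, ih]
    rfl

lemma pvPadFold_eq (v : Int) :
    ∀ (p : Nat) (j0 : Int) (cols : List Int),
      (PySem.List.enumerate (List.replicate p v) j0).foldl pvStepB cols
        = (PySem.List.pyRange j0 (j0 + (p : Int)) 1).foldl
            (fun cols j => PySem.List.pySetD cols j (PySem.List.pyGetD cols j 0 + v)) cols := by
  intro p
  induction p with
  | zero => intro j0 cols; simp [PySem.List.enumerate_nil, PySem.List.pyRange_one_eq_nil]
  | succ p ih =>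
    intro j0 cols
    rw [List.replicate_succ, PySem.List.enumerate_cons, List.foldl_cons,
        PySem.List.pyRange_one_cons (by push_cast; omega), List.foldl_cons]
    have : j0 + ((p : Int) + 1) = (j0 + 1) + (p : Int) := by ring
    push_cast
    rw [this, ih]
    rfl

lemma pvOuter_eq (b : Nat) :
    ∀ (m : Nat) (ys : List Char) (cols : List Int),
      (List.range m).foldl (fun cols k => pvInner ((ys.drop (k * b)).take b) cols) cols
        = pvChunkRec b m ys cols := by
  intro m
  induction m with
  | zero => intro ys cols; simp [pvChunkRec]
  | succ m ih =>
    intro ys cols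
    rw [List.range_succ_eq_map, List.foldl_cons, List.foldl_map]
    simp only [Nat.zero_mul, List.drop_zero]
    have hfun : (fun (cols : List Int) (k : Nat) => pvInner ((ys.drop (Nat.succ k * b)).take b) cols)
        = (fun (cols : List Int) (k : Nat) => pvInner (((ys.drop b).drop (k * b)).take b) cols) := by
      funext cols k
      rw [List.drop_drop]
      congr 2
      rw [Nat.succ_mul, Nat.add_comm]
    rw [hfun, ih]
    rfl

lemma pvMainNil (bs : Int) (hb : 0 < bs) (v : Int) (cols : List Int) (i0 : Int) :
    (PySem.List.enumerate (padLoop ([] : List Int) bs v bs.toNat) i0).foldl (pvStepA bs) cols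
      = cols := by
  have hbpos : 0 < bs.toNat := by omega
  rw [pvPadLoop_spec bs hb v bs.toNat ([]) (by simp [pvNeeded])]
  simp [pvNeeded, PySem.List.enumerate_nil]

lemma pvMain (bs : Int) (hb : 0 < bs) (v : Int) :
    ∀ (N : Nat) (xs : List Char) (cols : List Int) (i0 : Int),
      xs.length ≤ N → 0 ≤ i0 → PySem.Int.mod i0 bs = 0 →
      (PySem.List.enumerate (padLoop (xs.map (fun c => (c.toNat : Int))) bs v bs.toNat) i0).foldl (pvStepA bs) cols
        = (if xs.length % bs.toNat ≠ 0 then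
              pvPadFold bs v ((xs.length % bs.toNat : Nat) : Int)
                (pvChunkRec bs.toNat ((xs.length + bs.toNat - 1) / bs.toNat) xs cols)
            else pvChunkRec bs.toNat ((xs.length + bs.toNat - 1) / bs.toNat) xs cols) := by
  have hbs : bs = ((bs.toNat : Nat) : Int) := (Int.toNat_of_nonneg hb.le).symm
  set b := bs.toNat with hbdef
  have hbpos : 0 < b := by omega
  intro N
  induction N with
  | zero =>
    intro xs cols i0 hN hi0 hmod0
    have hx : xs = [] := List.eq_nil_of_length_eq_zero (by omega)
    subst hx
    have hm : (b - 1) / b = 0 := Nat.div_eq_of_lt (by omega)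
    simpa [hm, pvChunkRec] using pvMainNil bs hb v cols i0
  | succ N ih =>
    intro xs cols i0 hN hi0 hmod0
    set n := xs.length with hndef
    have hlenm' : (xs.map (fun c => (c.toNat : Int))).length = n := by simp [hndef]
    by_cases hn0 : n = 0
    · have hx : xs = [] := List.eq_nil_of_length_eq_zero (by omega)
      subst hx
      have hm : (b - 1) / b = 0 := Nat.div_eq_of_lt (by omega)
      simpa [hn0, hm, pvChunkRec] using pvMainNil bs hb v cols i0
    · by_cases hnb : n < b
      · -- single partial block, followed by padding
        have hlenm : (xs.map (fun c => (c.toNat : Int))).length = n := by simp [hndef]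
        have hneed : pvNeeded n b = b - n := by
          unfold pvNeeded; rw [Nat.mod_eq_of_lt hnb, Nat.mod_eq_of_lt (by omega)]
        rw [pvPadLoop_spec bs hb v b _ (by rw [hlenm, hneed]; omega), hlenm, hneed,
            PySem.List.enumerate_append, List.foldl_append]
        have h1 : (PySem.List.enumerate (xs.map (fun c => (c.toNat : Int))) i0).foldl (pvStepA bs) cols
            = pvInner xs cols := by
          rw [pvInner_eq bs hb _ 0 i0 cols le_rfl (by rw [hlenm]; omega) hi0 hmod0]
          rfl
        rw [hlenm, h1]
        have hmodn : PySem.Int.mod (i0 + (n : Int)) bs = (n : Int) := by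
          rw [PySem.Int.mod_eq_emod_of_pos hb] at hmod0 ⊢
          rw [Int.add_emod, hmod0, Int.zero_add, Int.emod_emod_of_dvd _ dvd_rfl,
              Int.emod_eq_of_lt (Int.natCast_nonneg n) (show ((n : Nat) : Int) < bs by omega)]
        rw [pvInner_eq bs hb _ (n : Int) (i0 + (n : Int)) (pvInner xs cols) (by omega)
            (by simp; omega) (by omega) hmodn,
            pvPadFold_eq v (b - n) (n : Int) (pvInner xs cols),
            show ((n : Int) + ((b - n : Nat) : Int)) = bs by omega]
        have hm1 : (n + b - 1) / b = 1 := Nat.div_eq_of_lt_le (by omega) (by omega)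
        have hmodnb : n % b = n := Nat.mod_eq_of_lt hnb
        rw [if_pos (by rw [hmodnb]; omega), hm1, hmodnb]
        simp only [pvChunkRec, List.take_of_length_le (by omega : xs.length ≤ b)]
        rfl
      · -- at least one full block: peel it off and use the induction hypothesis
        have hsplit : xs.map (fun c => (c.toNat : Int))
            = (xs.take b).map (fun c => (c.toNat : Int)) ++ (xs.drop b).map (fun c => (c.toNat : Int)) := by
          rw [← List.map_append, List.take_append_drop]
        have hclen : ((xs.take b).map (fun c => (c.toNat : Int))).length = b := by
          simp; omega
        have hrlen : ((xs.drop b).map (fun c => (c.toNat : Int))).length = n - b := by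
          simp [hndef]
        have hmodeq : n % b = (n - b) % b := by
          conv_lhs => rw [show n = (n - b) + b by omega]
          rw [Nat.add_mod_right]
        have hneedlt : pvNeeded n b ≤ b := by
          unfold pvNeeded; have := Nat.mod_lt (b - n % b) hbpos; omega
        have hneedeq : pvNeeded n b = pvNeeded (n - b) b := by
          unfold pvNeeded; rw [hmodeq]
        rw [pvPadLoop_spec bs hb v b _ (by rw [hlenm']; exact hneedlt)]
        rw [hlenm', hneedeq, hsplit, List.append_assoc]
        rw [show ((xs.drop b).map (fun c => (c.toNat : Int)) ++ List.replicate (pvNeeded (n - b) b) v)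
              = padLoop ((xs.drop b).map (fun c => (c.toNat : Int))) bs v b from by
            rw [pvPadLoop_spec bs hb v b _ (by
              rw [hrlen, ← hneedeq]; exact hneedlt), hrlen]]
        rw [PySem.List.enumerate_append, List.foldl_append, hclen]
        have h1 : (PySem.List.enumerate ((xs.take b).map (fun c => (c.toNat : Int))) i0).foldl (pvStepA bs) cols
            = pvInner (xs.take b) cols := by
          rw [pvInner_eq bs hb _ 0 i0 cols le_rfl (by rw [hclen]; omega) hi0 hmod0]
          rfl
        rw [h1]
        have hmodb : PySem.Int.mod (i0 + (b : Int)) bs = 0 := by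
          rw [PySem.Int.mod_eq_emod_of_pos hb] at hmod0 ⊢
          rw [show ((b : Nat) : Int) = bs from hbs.symm, Int.add_emod_right]
          exact hmod0
        rw [ih (xs.drop b) (pvInner (xs.take b) cols) (i0 + (b : Int)) (by simp; omega)
            (by omega) hmodb]
        have hdiv : (n + b - 1) / b = (n - b + b - 1) / b + 1 := by
          conv_lhs => rw [show n + b - 1 = (n - b + b - 1) + b by omega]
          rw [Nat.add_div_right _ hbpos]
        have hlendrop : (xs.drop b).length = n - b := by simp [hndef]
        rw [hlendrop, ← hmodeq, hdiv]
        simp only [pvChunkRec]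

lemma pvZeroMod (bs : Int) (hb : 0 < bs) : PySem.Int.mod 0 bs = 0 := by
  rw [PySem.Int.mod_eq_emod_of_pos hb]; exact Int.zero_emod bs

-- A's port, rewritten through pvMain into block-recursive form (bs ≥ 1).
lemma pvA_eq (phrase : String) (bs : Int) (hb : 0 < bs) :
    folding_hash phrase bs
      = (if phrase.toList.length % bs.toNat ≠ 0 then
            pvPadFold bs (pvOrdStr bs) ((phrase.toList.length % bs.toNat : Nat) : Int)
              (pvChunkRec bs.toNat ((phrase.toList.length + bs.toNat - 1) / bs.toNat) phrase.toList
                (List.replicate bs.toNat 0))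
          else
            pvChunkRec bs.toNat ((phrase.toList.length + bs.toNat - 1) / bs.toNat) phrase.toList
              (List.replicate bs.toNat 0)).map (fun s => PySem.Int.mod s 256) := by
  unfold folding_hash
  simp only []
  rw [show (fun (cols : List Int) (p : Int × Int) =>
        let target := PySem.Int.mod p.1 bs
        PySem.List.pySetD cols target (PySem.List.pyGetD cols target 0 + p.2)) = pvStepA bs from rfl]
  rw [pvMain bs hb (pvOrdStr bs) phrase.toList.length phrase.toList (List.replicate bs.toNat 0) 0
      le_rfl le_rfl (pvZeroMod bs hb)]

-- B's port in the same block-recursive form (bs ≥ 1).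
lemma pvAlt_eq (phrase : String) (bs : Int) (hb : 0 < bs) :
    folding_hash_alt phrase bs
      = (if phrase.toList.length % bs.toNat ≠ 0 then
            pvPadFold bs (pvOrdStr bs) ((phrase.toList.length % bs.toNat : Nat) : Int)
              (pvChunkRec bs.toNat ((phrase.toList.length + bs.toNat - 1) / bs.toNat) phrase.toList
                (List.replicate bs.toNat 0))
          else
            pvChunkRec bs.toNat ((phrase.toList.length + bs.toNat - 1) / bs.toNat) phrase.toList
              (List.replicate bs.toNat 0)).map (fun s => PySem.Int.mod s 256) := by
  unfold folding_hash_alt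
  simp only []
  have hbs : bs = ((bs.toNat : Nat) : Int) := (Int.toNat_of_nonneg hb.le).symm
  set b := bs.toNat with hbdef
  set xs := phrase.toList with hxs
  set n := xs.length with hn
  have hnum : PySem.Int.floordiv ((n : Int) + bs - 1) bs = (((n + b - 1) / b : Nat) : Int) := by
    rw [show ((n : Int) + bs - 1) = ((n + b - 1 : Nat) : Int) by omega, hbs,
        PySem.Int.floordiv_natCast]
  rw [hnum, PySem.List.pyRange_zero_nat ((n + b - 1) / b), List.foldl_map]
  have hfun : (fun (cols : List Int) (k : Nat) =>
        (PySem.List.enumerate (PySem.List.slice xs (some ((k : Int) * bs)) (some (((k : Int) + 1) * bs))) 0).foldl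
          (fun cols p => PySem.List.pySetD cols p.1 (PySem.List.pyGetD cols p.1 0 + (p.2.toNat : Int))) cols)
      = (fun (cols : List Int) (k : Nat) => pvInner ((xs.drop (k * b)).take b) cols) := by
    funext cols k
    rw [show ((k : Int) * bs) = ((k * b : Nat) : Int) by rw [hbs]; push_cast; ring,
        show (((k : Int) + 1) * bs) = ((k * b : Nat) : Int) + ((b : Nat) : Int) by
          rw [hbs]; push_cast; ring,
        PySem.List.slice_natCast_add, pvInner_chars]
    rfl
  rw [hfun, pvOuter_eq b ((n + b - 1) / b) xs (List.replicate b 0)]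
  have hfill : PySem.Int.mod (n : Int) bs = ((n % b : Nat) : Int) := by
    rw [hbs]; exact PySem.Int.mod_natCast n b
  rw [hfill]
  by_cases hz : n % b = 0
  · simp [hz]
  · rw [if_pos (by exact_mod_cast hz), if_pos hz]
    rfl

-- ===== VERDICT (by name: the statement is the Claim_ definition above) =====
theorem folding_hash_spec : Claim_equal_folding_hash := by
  intro phrase bs hdom hpre
  unfold Spec_folding_hash
  rcases hpre with ⟨hb1, _⟩ | ⟨hneg, hnil⟩
  · have hb : 0 < bs := by omega
    rw [pvA_eq phrase bs hb, pvAlt_eq phrase bs hb]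
  · -- block_size < 0 and the phrase is empty: both programs return []
    have h0 : bs.toNat = 0 := Int.toNat_of_nonpos hneg.le
    have hm0 : PySem.Int.mod 0 bs = 0 := Int.zero_fmod bs
    simp [folding_hash, folding_hash_alt, hnil, h0, padLoop, hm0,
          PySem.List.enumerate_nil, PySem.List.slice, List.foldl_fixed]
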